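-- pv_equiv track=rewrite | github.com/kalebruscitti/thematic-search | thematic_search/utilities.py | assign_cluster_tuples
-- ===== SOURCE A (Python) =====
-- from collections import defaultdict
--
-- def compute_layers(tree):
--     layers = {}
--     def dfs(node):
--         if node in layers:
--             return layers[node]
--         children = tree.get(node, [])
--         if not children:
--             layers[node] = 0
--         else:
--             layers[node] = max(dfs(c) for c in children) + 1
--         return layers[node]
--     for node in tree:
--         dfs(node)
--     return layers
--
-- def assign_cluster_tuples(tree, layers={}):
--     if layers == {}:
--         layers = compute_layers(tree)
--     by_layer = defaultdict(list)
--     for node, layer in layers.items():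
--         by_layer[layer].append(node)
--     result = {}
--     for layer in sorted(by_layer):
--         for i, node in enumerate(sorted(by_layer[layer])):
--             result[node] = (layer, i)
--     return result
-- ===== SOURCE B (Python) =====
-- def compute_layers(tree):
--     layers = {}
--     def dfs(node):
--         if node in layers:
--             return layers[node]
--         children = tree.get(node, [])
--         if not children:
--             layers[node] = 0
--         else:
--             layers[node] = max(dfs(c) for c in children) + 1
--         return layers[node]
--     for node in tree:
--         dfs(node)
--     return layers
--
-- def assign_cluster_tuples(tree, layers={}):
--     if layers == {}:
--         layers = compute_layers(tree)
--     result = {}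
--     prev = None
--     i = 0
--     for node, layer in sorted(layers.items(), key=lambda kv: (kv[1], kv[0])):
--         if layer != prev:
--             prev, i = layer, 0
--         result[node] = (layer, i)
--         i += 1
--     return result
-- ===== Notes on version B (the rewrite author's own statement) =====
-- stated objective: simpler
-- what changed: Replaces the defaultdict grouping plus a per-layer sort inside a loop over sorted layer keys with one global sort of layers.items() by (layer, node) followed by a single linear pass whose counter resets at each layer boundary.
import Mathlib
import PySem

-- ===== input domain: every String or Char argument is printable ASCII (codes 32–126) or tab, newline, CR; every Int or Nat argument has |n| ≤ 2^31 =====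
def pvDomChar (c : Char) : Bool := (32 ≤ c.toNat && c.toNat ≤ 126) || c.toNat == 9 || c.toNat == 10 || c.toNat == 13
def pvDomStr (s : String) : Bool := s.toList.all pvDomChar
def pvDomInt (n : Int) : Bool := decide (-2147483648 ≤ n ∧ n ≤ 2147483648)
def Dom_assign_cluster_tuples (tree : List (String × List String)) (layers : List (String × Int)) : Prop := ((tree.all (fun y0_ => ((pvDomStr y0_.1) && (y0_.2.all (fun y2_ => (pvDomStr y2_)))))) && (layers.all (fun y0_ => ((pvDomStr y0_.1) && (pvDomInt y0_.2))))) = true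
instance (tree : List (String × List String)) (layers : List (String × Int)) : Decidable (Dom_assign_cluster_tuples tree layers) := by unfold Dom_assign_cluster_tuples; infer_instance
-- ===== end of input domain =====

-- B replaces A's defaultdict grouping + per-layer sorting with one global sort by (layer, node)
-- and a single counter-resetting pass (objective: simpler; return value only — neither mutates).

-- ===== PORT A =====
-- tree.get(node, []) — first-match association-list lookup (Python dict; Pre_ requires unique keys)
def pvTreeGet (tree : List (String × List String)) (n : String) : List String :=
  (PySem.Dict.mk tree).getD n []

-- the inner dfs of compute_layers, with enough fuel for any acyclic tree (depth ≤ #keys + 1;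
-- fuel runs out only on inputs excluded by Pre_, where Python A raises RecursionError)
def pvDfs (tree : List (String × List String)) : Nat → String → PySem.Dict String Int → PySem.Dict String Int
  | 0, _, L => L
  | fuel+1, node, L =>
    if L.contains node then L
    else
      let children := pvTreeGet tree node
      if children = [] then L.insert node 0
      else
        -- max(dfs(c) for c in children): the generator threads the memo dict left to right
        let st := children.foldl
          (fun (st : PySem.Dict String Int × Option Int) c =>
            let L' := pvDfs tree fuel c st.1
            let v := L'.getD c 0
            (L', some (match st.2 with | none => v | some m => max m v)))
          (L, none)
        st.1.insert node (st.2.getD 0 + 1)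

def pvComputeLayers (tree : List (String × List String)) : PySem.Dict String Int :=
  tree.foldl (fun L p => pvDfs tree (tree.length + 1) p.1 L) PySem.Dict.empty

def assign_cluster_tuples (tree : List (String × List String)) (layers : List (String × Int)) : List (String × Int × Int) :=
  let L : PySem.Dict String Int := if layers = [] then pvComputeLayers tree else PySem.Dict.mk layers
  let by_layer : PySem.Dict Int (List String) :=
    L.items.foldl (fun d p => d.modify p.2 [] (fun xs => xs ++ [p.1])) PySem.Dict.empty
  let result : PySem.Dict String (Int × Int) :=
    (PySem.List.sorted by_layer.keys (fun x => x)).foldl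
      (fun r l =>
        (PySem.List.enumerate (PySem.List.sorted (by_layer.getD l []) (fun x => x)) 0).foldl
          (fun r q => r.insert q.2 (l, q.1)) r)
      PySem.Dict.empty
  result.items

-- ===== PORT B =====
def assign_cluster_tuples_alt (tree : List (String × List String)) (layers : List (String × Int)) : List (String × Int × Int) :=
  let L : PySem.Dict String Int := if layers = [] then pvComputeLayers tree else PySem.Dict.mk layers
  let s := PySem.List.sorted2 L.items (fun p => p.2) (fun p => p.1)
  let st := s.foldl
    (fun (st : PySem.Dict String (Int × Int) × Option Int × Int) p =>
      let pi : Option Int × Int := if st.2.1 = some p.2 then (st.2.1, st.2.2) else (some p.2, 0)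
      (st.1.insert p.1 (p.2, pi.2), pi.1, pi.2 + 1))
    (PySem.Dict.empty, none, 0)
  st.1.items

-- ===== PRECONDITION & SPEC =====
-- bounded-step reachability: pvReach tree n = every node reachable from n in ≥ 1 edge
-- (tree.length iterations saturate: any reachable node is reached by a path through distinct keys)
def pvStep (tree : List (String × List String)) (s : List String) : List String :=
  PySem.Set.ofList (s ++ s.flatMap (pvTreeGet tree))

def pvReach (tree : List (String × List String)) (n : String) : List String :=
  (pvStep tree)^[tree.length] (pvTreeGet tree n)

def pvAcyclic (tree : List (String × List String)) : Prop :=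
  ∀ p ∈ tree, p.1 ∉ pvReach tree p.1

-- Pre_ excludes association lists with duplicate keys (they do not denote Python dicts), and,
-- when layers is empty, cyclic trees, on which Python A's dfs raises RecursionError.
def Pre_assign_cluster_tuples (tree : List (String × List String)) (layers : List (String × Int)) : Prop :=
  (tree.map Prod.fst).Nodup ∧ (layers.map Prod.fst).Nodup ∧ (layers = [] → pvAcyclic tree)

instance (tree : List (String × List String)) (layers : List (String × Int)) : Decidable (Pre_assign_cluster_tuples tree layers) := by
  unfold Pre_assign_cluster_tuples pvAcyclic; infer_instance

def pvWitness_assign_cluster_tuples : (List (String × List String)) × (List (String × Int)) :=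
  ([("a", ["b"]), ("b", [])], [("a", 1), ("b", 0)])

def Spec_assign_cluster_tuples (tree : List (String × List String)) (layers : List (String × Int)) (out : List (String × Int × Int)) : Prop := out = assign_cluster_tuples_alt tree layers
instance (tree : List (String × List String)) (layers : List (String × Int)) (out : List (String × Int × Int)) : Decidable (Spec_assign_cluster_tuples tree layers out) := by unfold Spec_assign_cluster_tuples; infer_instance

-- ===== CLAIM (what is proved, stated in full; the proofs are below) =====
def Claim_equal_assign_cluster_tuples : Prop := ∀ (tree : List (String × List String)) (layers : List (String × Int)), Dom_assign_cluster_tuples tree layers → Pre_assign_cluster_tuples tree layers → Spec_assign_cluster_tuples tree layers (assign_cluster_tuples tree layers)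

-- ===== LEMMAS AND PROOFS =====

-- strict and non-strict "(layer, node)" lexicographic orders on items
def pvLex (a b : String × Int) : Prop := a.2 < b.2 ∨ (a.2 = b.2 ∧ a.1 < b.1)
def pvLexLe (a b : String × Int) : Prop := a.2 < b.2 ∨ (a.2 = b.2 ∧ a.1 ≤ b.1)

-- the pure function computed by B's counter-resetting pass
def pvAnnotate : List (String × Int) → Option Int → Int → List (String × Int × Int)
  | [], _, _ => []
  | p :: t, prev, i =>
    if prev = some p.2 then (p.1, p.2, i) :: pvAnnotate t prev (i + 1)
    else (p.1, p.2, 0) :: pvAnnotate t (some p.2) 1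

theorem pvLexLe_trans {a b c : String × Int} (h1 : pvLexLe a b) (h2 : pvLexLe b c) : pvLexLe a c := by
  rcases h1 with h1 | ⟨h1, h1'⟩
  · rcases h2 with h2 | ⟨h2, _⟩
    · exact Or.inl (lt_trans h1 h2)
    · exact Or.inl (h2 ▸ h1)
  · rcases h2 with h2 | ⟨h2, h2'⟩
    · exact Or.inl (h1 ▸ h2)
    · exact Or.inr ⟨h1.trans h2, le_trans h1' h2'⟩

theorem pvLex_le {a b : String × Int} (h : pvLex a b) : pvLexLe a b := by
  rcases h with h | ⟨h, h'⟩
  · exact Or.inl h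
  · exact Or.inr ⟨h, le_of_lt h'⟩

-- the comparison sorted2 uses
def pvLt (a b : String × Int) : Bool :=
  decide (a.2 < b.2) || (!decide (b.2 < a.2) && decide (a.1 < b.1))

theorem pvLt_true {a b : String × Int} (h : pvLt a b = true) : pvLexLe a b := by
  simp only [pvLt, Bool.or_eq_true, Bool.and_eq_true, Bool.not_eq_true', decide_eq_true_eq,
    decide_eq_false_iff_not] at h
  rcases h with h | ⟨h1, h2⟩
  · exact Or.inl h
  · rcases lt_or_eq_of_le (le_of_not_gt h1) with h | h
    · exact Or.inl h
    · exact Or.inr ⟨h, le_of_lt h2⟩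

theorem pvLt_false {a b : String × Int} (h : pvLt a b = false) : pvLexLe b a := by
  simp only [pvLt, Bool.or_eq_false_iff, Bool.and_eq_false_iff, Bool.not_eq_false',
    decide_eq_true_eq, decide_eq_false_iff_not] at h
  rcases h with ⟨h1, h2 | h2⟩
  · exact Or.inl h2
  · rcases lt_or_eq_of_le (le_of_not_gt h1) with h | h
    · exact Or.inl h
    · exact Or.inr ⟨h, le_of_not_gt h2⟩

theorem pvLexLe_antisymm {a b : String × Int} (h1 : pvLexLe a b) (h2 : pvLexLe b a) : a = b := by
  rcases h1 with h1 | ⟨h1, h1'⟩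
  · rcases h2 with h2 | ⟨h2, _⟩
    · exact absurd h2 (lt_asymm h1)
    · exact absurd (h2 ▸ h1) (lt_irrefl _)
  · rcases h2 with h2 | ⟨_, h2'⟩
    · exact absurd (h1 ▸ h2) (lt_irrefl _)
    · exact Prod.ext (le_antisymm h1' h2') h1

theorem pvInsertBy_pairwise (x : String × Int) (ys : List (String × Int))
    (h : ys.Pairwise pvLexLe) :
    (PySem.List.insertBy pvLt x ys).Pairwise pvLexLe := by
  induction ys with
  | nil => simp [PySem.List.insertBy]
  | cons y t ih =>
    by_cases hxy : pvLt x y = true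
    · rw [show PySem.List.insertBy pvLt x (y :: t) = x :: y :: t by
        simp [PySem.List.insertBy, hxy]]
      refine List.Pairwise.cons ?_ h
      intro z hz
      rcases List.mem_cons.mp hz with rfl | hz
      · exact pvLt_true hxy
      · exact pvLexLe_trans (pvLt_true hxy) (List.rel_of_pairwise_cons h hz)
    · rw [show PySem.List.insertBy pvLt x (y :: t) = y :: PySem.List.insertBy pvLt x t by
        simp [PySem.List.insertBy, hxy]]
      refine List.Pairwise.cons ?_ (ih (List.Pairwise.of_cons h))
      intro z hz
      rw [PySem.List.mem_insertBy] at hz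
      rcases hz with rfl | hz
      · exact pvLt_false (Bool.eq_false_iff.mpr hxy)
      · exact List.rel_of_pairwise_cons h hz

theorem pvFoldl_insertBy_pairwise (xs acc : List (String × Int)) (hacc : acc.Pairwise pvLexLe) :
    (xs.foldl (fun acc x => PySem.List.insertBy pvLt x acc) acc).Pairwise pvLexLe := by
  induction xs generalizing acc with
  | nil => exact hacc
  | cons x t ih => exact ih _ (pvInsertBy_pairwise x acc hacc)

theorem pvSorted2_pairwise (xs : List (String × Int)) :
    (PySem.List.sorted2 xs (fun p => p.2) (fun p => p.1)).Pairwise pvLexLe := by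
  have he : PySem.List.sorted2 xs (fun p => p.2) (fun p => p.1)
      = xs.foldl (fun acc x => PySem.List.insertBy pvLt x acc) [] := rfl
  rw [he]
  exact pvFoldl_insertBy_pairwise xs [] List.Pairwise.nil

theorem pvSorted2_eq (xs ys : List (String × Int)) (hperm : ys.Perm xs)
    (hpw : ys.Pairwise pvLex) :
    PySem.List.sorted2 xs (fun p => p.2) (fun p => p.1) = ys := by
  have hzp : (PySem.List.sorted2 xs (fun p => p.2) (fun p => p.1)).Perm xs :=
    PySem.List.sorted2_perm xs _ _ false
  exact List.eq_of_perm_of_sorted (fun a b _ _ hab hba => pvLexLe_antisymm hab hba)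
    (pvSorted2_pairwise xs) (hpw.imp pvLex_le) (hzp.trans hperm.symm)

-- B's loop step, named for the proofs
def pvBStep (st : PySem.Dict String (Int × Int) × Option Int × Int) (p : String × Int) :
    PySem.Dict String (Int × Int) × Option Int × Int :=
  let pi : Option Int × Int := if st.2.1 = some p.2 then (st.2.1, st.2.2) else (some p.2, 0)
  (st.1.insert p.1 (p.2, pi.2), pi.1, pi.2 + 1)

theorem pvB_loop (s : List (String × Int)) (r : PySem.Dict String (Int × Int))
    (prev : Option Int) (i : Int)
    (hfresh : ∀ p ∈ s, r.contains p.1 = false)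
    (hnd : (s.map Prod.fst).Nodup) :
    (s.foldl pvBStep (r, prev, i)).1.items = r.items ++ pvAnnotate s prev i := by
  induction s generalizing r prev i with
  | nil => simp [pvAnnotate]
  | cons p t ih =>
    rw [List.foldl_cons]
    rw [List.map_cons, List.nodup_cons] at hnd
    have hp : r.contains p.1 = false := hfresh p List.mem_cons_self
    have hfr : ∀ (v : Int × Int), ∀ q ∈ t, (r.insert p.1 v).contains q.1 = false := by
      intro v q hq
      rw [PySem.Dict.contains_insert]
      have h1 : (q.1 == p.1) = false := by
        simp only [beq_eq_false_iff_ne, ne_eq]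
        intro he; exact hnd.1 (he ▸ List.mem_map_of_mem hq)
      rw [h1, hfresh q (List.mem_cons_of_mem _ hq), Bool.or_self]
    by_cases hpr : prev = some p.2
    · have hstep : pvBStep (r, prev, i) p = (r.insert p.1 (p.2, i), prev, i + 1) := by
        simp [pvBStep, hpr]
      rw [hstep, ih _ _ _ (hfr _) hnd.2, PySem.Dict.items_insert_of_not_contains _ _ hp]
      simp [pvAnnotate, hpr]
    · have hstep : pvBStep (r, prev, i) p = (r.insert p.1 (p.2, 0), some p.2, 1) := by
        simp [pvBStep, hpr]
      rw [hstep, ih _ _ _ (hfr _) hnd.2, PySem.Dict.items_insert_of_not_contains _ _ hp]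
      simp [pvAnnotate, hpr]

-- A's nested loop appends one block per layer
theorem pvA_loop (d : PySem.Dict Int (List String)) (ls : List Int)
    (r : PySem.Dict String (Int × Int))
    (hfresh : ∀ l ∈ ls, ∀ n ∈ PySem.List.sorted (d.getD l []) (fun x => x), r.contains n = false)
    (hnd : ((ls.map (fun l => PySem.List.sorted (d.getD l []) (fun x => x))).flatten).Nodup) :
    (ls.foldl (fun r l =>
        (PySem.List.enumerate (PySem.List.sorted (d.getD l []) (fun x => x)) 0).foldl
          (fun r q => r.insert q.2 (l, q.1)) r) r).items
      = r.items ++ (ls.map (fun l =>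
          (PySem.List.enumerate (PySem.List.sorted (d.getD l []) (fun x => x)) 0).map
            (fun q => (q.2, l, q.1)))).flatten := by
  induction ls generalizing r with
  | nil => simp
  | cons l t ih =>
    simp only [List.foldl_cons, List.map_cons, List.flatten_cons]
    rw [List.map_cons, List.flatten_cons, List.nodup_append] at hnd
    have hinner : ((PySem.List.enumerate (PySem.List.sorted (d.getD l []) (fun x => x)) 0).foldl
        (fun r q => r.insert q.2 (l, q.1)) r).items
        = r.items ++ (PySem.List.enumerate (PySem.List.sorted (d.getD l []) (fun x => x)) 0).map
            (fun q => (q.2, l, q.1)) := by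
      refine PySem.Dict.items_foldl_insert_fresh _ (fun q : Int × String => q.2) (fun q : Int × String => (l, q.1)) r ?_ ?_
      · intro q hq
        refine hfresh l List.mem_cons_self q.2 ?_
        rw [← PySem.List.map_snd_enumerate (PySem.List.sorted (d.getD l []) (fun x => x)) 0]
        exact List.mem_map_of_mem hq
      · rw [PySem.List.map_snd_enumerate]; exact hnd.1
    have hkeys : ((PySem.List.enumerate (PySem.List.sorted (d.getD l []) (fun x => x)) 0).foldl
        (fun r q => r.insert q.2 (l, q.1)) r).keys
        = PySem.Set.update r.keys
            ((PySem.List.enumerate (PySem.List.sorted (d.getD l []) (fun x => x)) 0).map (fun q => q.2)) :=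
      PySem.Dict.keys_foldl_insert_key _ _ _ _
    rw [ih _ ?fr ?nd, hinner, List.append_assoc]
    case fr =>
      intro l' hl' n hn
      rw [PySem.Dict.contains_eq_decide_mem_keys, hkeys, decide_eq_false_iff_not, PySem.Set.mem_update]
      rintro (hmem | hmem)
      · have h2 := hfresh l' (List.mem_cons_of_mem _ hl') n hn
        rw [PySem.Dict.contains_eq_decide_mem_keys, decide_eq_false_iff_not] at h2
        exact h2 hmem
      · rw [PySem.List.map_snd_enumerate] at hmem
        exact hnd.2.2 n hmem n (List.mem_flatten.mpr ⟨_, List.mem_map_of_mem hl', hn⟩) rfl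
    case nd => exact hnd.2.1

-- the bucket of a layer, in item order
def pvBu (it : List (String × Int)) (l : Int) : List String :=
  (it.filter (fun p => p.2 == l)).map Prod.fst

-- the sorted list of distinct layer values
def pvSL (it : List (String × Int)) : List Int :=
  PySem.List.sorted (PySem.Set.ofList (it.map (fun p => p.2))) (fun x => x)

-- the globally (layer, node)-sorted item list, block by block
def pvT (it : List (String × Int)) : List (String × Int) :=
  ((pvSL it).map (fun l => (PySem.List.sorted (pvBu it l) (fun x => x)).map (fun n => (n, l)))).flatten

theorem pvByLayer_getD (it : List (String × Int)) (l : Int) :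
    (it.foldl (fun d p => d.modify p.2 [] (fun xs => xs ++ [p.1])) PySem.Dict.empty).getD l []
      = pvBu it l := by
  have h1 : it.foldl (fun d p => d.modify p.2 [] (fun xs => xs ++ [p.1])) PySem.Dict.empty
      = (it.map (fun p => (p.2, p.1))).foldl (fun d q => d.modify q.1 [] (fun xs => xs ++ [q.2])) PySem.Dict.empty := by
    rw [List.foldl_map]
  rw [h1, PySem.Dict.getD_foldl_modify_append, PySem.Dict.getD_empty]
  rw [List.filter_map, List.map_map]
  rfl

theorem pvByLayer_keys (it : List (String × Int)) :
    (it.foldl (fun d p => d.modify p.2 [] (fun xs => xs ++ [p.1])) PySem.Dict.empty).keys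
      = PySem.Set.ofList (it.map (fun p => p.2)) := by
  rw [PySem.Dict.keys_foldl_modify_key it (fun p => p.2) [] (fun _ p => fun xs => xs ++ [p.1]) PySem.Dict.empty]
  rw [PySem.Dict.keys_empty, PySem.Set.update_nil_left]

theorem pvBu_ne_nil (it : List (String × Int)) (l : Int) (h : l ∈ pvSL it) : pvBu it l ≠ [] := by
  rw [pvSL, PySem.List.mem_sorted, PySem.Set.mem_ofList, List.mem_map] at h
  obtain ⟨p, hp, rfl⟩ := h
  simp only [pvBu, ne_eq, List.map_eq_nil_iff, List.filter_eq_nil_iff, not_forall]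
  exact ⟨p, hp, by simp⟩

theorem pvSL_nodup (it : List (String × Int)) : (pvSL it).Nodup := by
  rw [pvSL]
  exact (PySem.List.sorted_perm _ _ false).symm.nodup (PySem.Set.nodup_ofList _)

theorem pvBu_nodup (it : List (String × Int)) (hnd : (it.map Prod.fst).Nodup) (l : Int) :
    (pvBu it l).Nodup :=
  hnd.sublist ((List.filter_sublist).map Prod.fst)

theorem pvPerm_flatten_map {α β : Type} (ls : List α) (f g : α → List β)
    (h : ∀ x ∈ ls, (f x).Perm (g x)) : ((ls.map f).flatten).Perm ((ls.map g).flatten) := by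
  induction ls with
  | nil => rfl
  | cons x t ih =>
    simp only [List.map_cons, List.flatten_cons]
    exact (h x List.mem_cons_self).append (ih (fun y hy => h y (List.mem_cons_of_mem _ hy)))

theorem pvFilters_perm (it : List (String × Int)) (ls : List Int) (hnd : ls.Nodup) :
    ((ls.map (fun l => it.filter (fun p => p.2 == l))).flatten).Perm
      (it.filter (fun p => decide (p.2 ∈ ls))) := by
  induction ls with
  | nil => simp
  | cons l t ih =>
    rw [List.nodup_cons] at hnd
    simp only [List.map_cons, List.flatten_cons]
    have hsplit := List.filter_append_perm (fun p => p.2 == l)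
      (it.filter (fun p => decide (p.2 ∈ l :: t)))
    rw [List.filter_filter, List.filter_filter] at hsplit
    have e1 : it.filter (fun p => (p.2 == l) && decide (p.2 ∈ l :: t)) = it.filter (fun p => p.2 == l) := by
      apply List.filter_congr
      intro p _
      by_cases h : p.2 = l <;> simp [h]
    have e2 : it.filter (fun p => (!(p.2 == l)) && decide (p.2 ∈ l :: t)) = it.filter (fun p => decide (p.2 ∈ t)) := by
      apply List.filter_congr
      intro p _
      by_cases h : p.2 = l
      · simp [h, hnd.1]
      · simp [h]
    rw [e1, e2] at hsplit
    exact ((ih hnd.2).append_left _).trans hsplit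

theorem pvT_perm (it : List (String × Int)) : (pvT it).Perm it := by
  have hblock : ∀ l : Int, ((PySem.List.sorted (pvBu it l) (fun x => x)).map (fun n => (n, l))).Perm
      (it.filter (fun p => p.2 == l)) := by
    intro l
    have he : (pvBu it l).map (fun n => (n, l)) = it.filter (fun p => p.2 == l) := by
      rw [pvBu, List.map_map]
      conv_rhs => rw [← List.map_id (it.filter (fun p => p.2 == l))]
      apply List.map_congr_left
      intro p hp
      have h2 : p.2 = l := by simpa using (List.mem_filter.mp hp).2
      show (p.1, l) = p
      rw [← h2]
    exact he ▸ ((PySem.List.sorted_perm (pvBu it l) (fun x => x) false).map (fun n => (n, l)))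
  refine (pvPerm_flatten_map (pvSL it) _ (fun l => it.filter (fun p => p.2 == l))
      (fun l _ => hblock l)).trans ?_
  refine (pvFilters_perm it (pvSL it) (pvSL_nodup it)).trans ?_
  have hself : it.filter (fun p => decide (p.2 ∈ pvSL it)) = it := by
    apply List.filter_eq_self.mpr
    intro p hp
    simp only [decide_eq_true_eq, pvSL, PySem.List.mem_sorted, PySem.Set.mem_ofList]
    exact List.mem_map_of_mem hp
  rw [hself]

theorem pvT_pairwise (it : List (String × Int)) (hnd : (it.map Prod.fst).Nodup) :
    (pvT it).Pairwise pvLex := by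
  rw [pvT, List.pairwise_flatten]
  constructor
  · intro b hb
    rw [List.mem_map] at hb
    obtain ⟨l, hl, rfl⟩ := hb
    rw [List.pairwise_map]
    have hsorted := PySem.List.sorted_pairwise (pvBu it l) (fun x => x)
    have hnodup : (PySem.List.sorted (pvBu it l) (fun x => x)).Nodup :=
      (PySem.List.sorted_perm (pvBu it l) (fun x => x) false).symm.nodup (pvBu_nodup it hnd l)
    refine (hsorted.and hnodup).imp ?_
    rintro a b ⟨hle, hne⟩
    exact Or.inr ⟨rfl, lt_of_le_of_ne hle hne⟩
  · rw [List.pairwise_map]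
    refine (PySem.List.sorted_ofList_pairwise_lt (it.map (fun p => p.2))).imp ?_
    intro l₁ l₂ hlt x hx y hy
    rw [List.mem_map] at hx hy
    obtain ⟨n₁, _, rfl⟩ := hx
    obtain ⟨n₂, _, rfl⟩ := hy
    exact Or.inl hlt

theorem pvS_eq_T (it : List (String × Int)) (hnd : (it.map Prod.fst).Nodup) :
    PySem.List.sorted2 it (fun p => p.2) (fun p => p.1) = pvT it :=
  pvSorted2_eq it (pvT it) (pvT_perm it) (pvT_pairwise it hnd)

theorem pvAnnotate_irrel (s : List (String × Int)) (prev : Option Int) (i j : Int)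
    (h : ∀ p, s.head? = some p → prev ≠ some p.2) :
    pvAnnotate s prev i = pvAnnotate s prev j := by
  cases s with
  | nil => rfl
  | cons p t =>
    have h2 := h p rfl
    simp [pvAnnotate, h2]

theorem pvAnnotate_block (ns : List String) (l : Int) (rest : List (String × Int)) (i : Int) :
    pvAnnotate ((ns.map (fun n => (n, l))) ++ rest) (some l) i
      = (PySem.List.enumerate ns i).map (fun q => (q.2, l, q.1))
        ++ pvAnnotate rest (some l) (i + ns.length) := by
  induction ns generalizing i with
  | nil => simp [PySem.List.enumerate_nil]
  | cons n t ih =>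
    simp only [List.map_cons, List.cons_append, PySem.List.enumerate_cons]
    rw [pvAnnotate, if_pos rfl, ih (i + 1)]
    simp only [List.length_cons]
    have harith : i + 1 + (t.length : Int) = i + ((t.length : Int) + 1) := by omega
    rw [harith, show ((t.length + 1 : Nat) : Int) = (t.length : Int) + 1 from by omega]

theorem pvAnnotate_flatten (ls : List Int) (f : Int → List String) (prev : Option Int)
    (hne : ∀ l ∈ ls, f l ≠ [])
    (hch : ls.Pairwise (· ≠ ·))
    (hprev : ∀ l, ls.head? = some l → prev ≠ some l) :
    pvAnnotate ((ls.map (fun l => (f l).map (fun n => (n, l)))).flatten) prev 0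
      = (ls.map (fun l => (PySem.List.enumerate (f l) 0).map (fun q => (q.2, l, q.1)))).flatten := by
  induction ls generalizing prev with
  | nil => rfl
  | cons l t ih =>
    have hch2 := List.pairwise_cons.mp hch
    obtain ⟨n₀, ns, hfl⟩ : ∃ n₀ ns, f l = n₀ :: ns := by
      cases hh : f l with
      | nil => exact absurd hh (hne l List.mem_cons_self)
      | cons a b => exact ⟨a, b, rfl⟩
    have hheads : ∀ p : String × Int,
        ((t.map (fun l => (f l).map (fun n => (n, l)))).flatten).head? = some p →
        (some l : Option Int) ≠ some p.2 := by
      intro p hp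
      cases t with
      | nil => simp at hp
      | cons l' t' =>
        obtain ⟨m₀, ms, hfl'⟩ : ∃ m₀ ms, f l' = m₀ :: ms := by
          cases hh : f l' with
          | nil => exact absurd hh (hne l' (List.mem_cons_of_mem _ List.mem_cons_self))
          | cons a b => exact ⟨a, b, rfl⟩
        rw [List.map_cons, List.flatten_cons, hfl'] at hp
        simp only [List.map_cons, List.cons_append, List.head?_cons, Option.some_inj] at hp
        rw [← hp]
        simp only [ne_eq, Option.some_inj]
        exact hch2.1 l' List.mem_cons_self
    simp only [List.map_cons, List.flatten_cons, hfl]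
    simp only [List.cons_append]
    rw [pvAnnotate, if_neg (hprev l rfl), pvAnnotate_block ns l _ 1]
    rw [PySem.List.enumerate_cons]
    rw [pvAnnotate_irrel _ _ _ 0 hheads]
    rw [ih (some l) (fun x hx => hne x (List.mem_cons_of_mem _ hx)) hch2.2
      (by
        intro l' h
        cases t with
        | nil => exact absurd h (by simp)
        | cons a b =>
          rw [List.head?_cons, Option.some_inj] at h
          simp only [ne_eq, Option.some_inj]
          exact h ▸ hch2.1 a List.mem_cons_self)]
    simp


theorem pvFoldl_fst_keys_nodup {σ : Type} (cs : List String)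
    (g : (PySem.Dict String Int × σ) → String → (PySem.Dict String Int × σ))
    (hg : ∀ st c, st.1.keys.Nodup → (g st c).1.keys.Nodup) :
    ∀ st, st.1.keys.Nodup → (cs.foldl g st).1.keys.Nodup := by
  induction cs with
  | nil => intro st h; exact h
  | cons c t iht => intro st h; exact iht _ (hg st c h)

theorem pvDfs_keys_nodup (tree : List (String × List String)) (fuel : Nat) :
    ∀ (n : String) (L : PySem.Dict String Int), L.keys.Nodup → (pvDfs tree fuel n L).keys.Nodup := by
  induction fuel with
  | zero => intro n L h; exact h
  | succ f ih =>
    intro n L h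
    rw [pvDfs]
    dsimp only
    by_cases h1 : L.contains n = true
    · rw [if_pos h1]; exact h
    · rw [if_neg h1]
      by_cases h2 : pvTreeGet tree n = []
      · rw [if_pos h2]; exact PySem.Dict.nodup_keys_insert _ _ _ h
      · rw [if_neg h2]
        refine PySem.Dict.nodup_keys_insert _ _ _ ?_
        refine pvFoldl_fst_keys_nodup _ _ ?_ _ h
        intro st c hst
        exact ih c st.1 hst

theorem pvComputeLayers_keys_nodup (tree : List (String × List String)) :
    (pvComputeLayers tree).keys.Nodup := by
  rw [pvComputeLayers]
  have hfold : ∀ (ts : List (String × List String)) (L : PySem.Dict String Int),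
      L.keys.Nodup →
      (ts.foldl (fun L p => pvDfs tree (tree.length + 1) p.1 L) L).keys.Nodup := by
    intro ts
    induction ts with
    | nil => intro L h; exact h
    | cons p t iht => intro L h; exact iht _ (pvDfs_keys_nodup tree _ p.1 L h)
  exact hfold tree PySem.Dict.empty (PySem.Dict.nodup_keys_empty)

theorem pvCore (it : List (String × Int)) (hnd : (it.map Prod.fst).Nodup) :
    ((PySem.List.sorted
        (it.foldl (fun d p => d.modify p.2 [] (fun xs => xs ++ [p.1])) PySem.Dict.empty).keys
        (fun x => x)).foldl
      (fun r l =>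
        (PySem.List.enumerate
          (PySem.List.sorted
            ((it.foldl (fun d p => d.modify p.2 [] (fun xs => xs ++ [p.1])) PySem.Dict.empty).getD l [])
            (fun x => x)) 0).foldl
          (fun r q => r.insert q.2 (l, q.1)) r)
      PySem.Dict.empty).items
    = (((PySem.List.sorted2 it (fun p => p.2) (fun p => p.1)).foldl pvBStep
        (PySem.Dict.empty, none, 0)).1.items) := by
  have hTnodup : ((pvT it).map Prod.fst).Nodup := ((pvT_perm it).map Prod.fst).symm.nodup hnd
  have hmapfst : (pvT it).map Prod.fst
      = ((pvSL it).map (fun l => PySem.List.sorted (pvBu it l) (fun x => x))).flatten := by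
    rw [pvT, List.map_flatten, List.map_map]
    congr 1
    apply List.map_congr_left
    intro l _
    dsimp only [Function.comp]
    rw [List.map_map, show (Prod.fst ∘ fun n : String => (n, l)) = id from rfl, List.map_id]
  -- A side
  rw [pvByLayer_keys it]
  rw [show PySem.List.sorted (PySem.Set.ofList (it.map (fun p => p.2))) (fun x => x) = pvSL it from rfl]
  rw [pvA_loop _ (pvSL it) PySem.Dict.empty
    (by intro l _ n _; exact PySem.Dict.contains_empty _)
    (by
      rw [show (fun l => PySem.List.sorted
          ((it.foldl (fun d p => d.modify p.2 [] (fun xs => xs ++ [p.1])) PySem.Dict.empty).getD l [])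
          (fun x => x))
        = (fun l => PySem.List.sorted (pvBu it l) (fun x => x)) from funext (fun l => by rw [pvByLayer_getD])]
      rw [← hmapfst]
      exact hTnodup)]
  -- B side
  rw [pvS_eq_T it hnd]
  rw [pvB_loop (pvT it) PySem.Dict.empty none 0
    (by intro p _; exact PySem.Dict.contains_empty _) hTnodup]
  -- both reduce to the same flatten
  have hannot : pvAnnotate (pvT it) none 0
      = ((pvSL it).map (fun l =>
          (PySem.List.enumerate (PySem.List.sorted (pvBu it l) (fun x => x)) 0).map
            (fun q => (q.2, l, q.1)))).flatten := by
    rw [pvT]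
    exact pvAnnotate_flatten (pvSL it) (fun l => PySem.List.sorted (pvBu it l) (fun x => x)) none
      (fun l hl => by
        rw [ne_eq, PySem.List.sorted_eq_nil_iff]
        exact pvBu_ne_nil it l hl)
      ((PySem.List.sorted_ofList_pairwise_lt (it.map (fun p => p.2))).imp (fun h => ne_of_lt h))
      (fun l _ => by simp)
  rw [hannot]
  have hemp : (PySem.Dict.empty : PySem.Dict String (Int × Int)).items = [] := rfl
  rw [hemp]
  simp only [List.nil_append]
  congr 1
  apply List.map_congr_left
  intro l _
  rw [pvByLayer_getD]

-- ===== VERDICT (by name: the statement is the Claim_ definition above) =====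
theorem assign_cluster_tuples_spec : Claim_equal_assign_cluster_tuples := by
  intro tree layers _ hpre
  unfold Spec_assign_cluster_tuples
  show assign_cluster_tuples tree layers = assign_cluster_tuples_alt tree layers
  unfold assign_cluster_tuples assign_cluster_tuples_alt
  have hnd : (((if layers = [] then pvComputeLayers tree else PySem.Dict.mk layers)).items.map Prod.fst).Nodup := by
    by_cases h : layers = []
    · rw [if_pos h]
      exact pvComputeLayers_keys_nodup tree
    · rw [if_neg h]
      exact hpre.2.1
  exact pvCore _ hnd
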